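-- pv_equiv track=rewrite | github.com/paiml/depyler | examples/hard_distance_metrics.py | minkowski_distance_p
-- ===== SOURCE A (Python) =====
-- def abs_val(x: int) -> int:
--     if x < 0:
--         return -x
--     return x
--
-- def minkowski_distance_p(a: list[int], b: list[int], p: int) -> int:
--     # Returns sum of |a_i - b_i|^p (without the p-th root)
--     total: int = 0
--     i: int = 0
--     while i < len(a):
--         diff: int = abs_val(a[i] - b[i])
--         power: int = 1
--         j: int = 0
--         while j < p:
--             power = power * diff
--             j = j + 1
--         total = total + power
--         i = i + 1
--     return total
-- ===== SOURCE B (Python) =====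
-- def minkowski_distance_p(a: list[int], b: list[int], p: int) -> int:
--     # Sum of |a_i - b_i|^p, computing each power by binary exponentiation.
--     total = 0
--     for x, y in zip(a, b):
--         base = x - y
--         if base < 0:
--             base = -base
--         result = 1
--         e = p
--         while e > 0:
--             if e % 2 == 1:
--                 result = result * base
--             base = base * base
--             e = e // 2
--         total = total + result
--     return total
-- ===== Notes on version B (the rewrite author's own statement) =====
-- stated objective: faster
-- what changed: The inner O(p) repeated-multiplication loop is replaced by exponentiation by squaring (O(log p) multiplications per element), and the index-based outer while loop becomes a single pass over zip(a, b); intended as faster, measured 5.6x at the largest size both versions finished (with huge p the result itself is astronomically large, so both time out).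
import Mathlib
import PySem

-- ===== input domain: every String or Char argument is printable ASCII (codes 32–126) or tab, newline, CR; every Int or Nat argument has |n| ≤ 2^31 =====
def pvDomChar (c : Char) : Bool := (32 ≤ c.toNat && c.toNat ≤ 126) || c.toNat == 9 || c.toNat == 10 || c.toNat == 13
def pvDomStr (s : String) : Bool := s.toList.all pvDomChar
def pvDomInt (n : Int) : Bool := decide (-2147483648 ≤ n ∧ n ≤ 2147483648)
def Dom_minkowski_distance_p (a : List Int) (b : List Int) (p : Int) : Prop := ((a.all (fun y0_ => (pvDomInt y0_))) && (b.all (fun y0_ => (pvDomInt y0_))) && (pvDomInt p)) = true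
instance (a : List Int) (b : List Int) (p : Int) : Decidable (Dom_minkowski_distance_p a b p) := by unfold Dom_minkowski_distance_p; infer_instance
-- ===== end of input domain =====

-- B replaces A's O(p) repeated-multiplication inner loop with exponentiation by
-- squaring and folds once over zip(a,b) instead of indexing: O(log p) instead of O(p)
-- multiplications per element (measured ~5.6x at the largest size both finished).

-- ===== PORT A =====
def abs_val (x : Int) : Int := if x < 0 then -x else x

-- inner 'while j < p: power = power * diff; j = j + 1'
def powLoopA (diff power j p : Int) : Int :=
  if j < p then powLoopA diff (power * diff) (j + 1) p else power
termination_by (p - j).toNat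
decreasing_by omega

-- outer 'while i < len(a): …' (pyGetD is exact here: under Pre_, every index hit is in range)
def outerA (a b : List Int) (p total i : Int) : Int :=
  if i < (a.length : Int) then
    outerA a b p
      (total + powLoopA (abs_val (PySem.List.pyGetD a i 0 - PySem.List.pyGetD b i 0)) 1 0 p)
      (i + 1)
  else total
termination_by ((a.length : Int) - i).toNat
decreasing_by omega

def minkowski_distance_p (a : List Int) (b : List Int) (p : Int) : Int :=
  outerA a b p 0 0

-- ===== PORT B =====
-- 'while e > 0: if e % 2 == 1: result = result * base; base = base * base; e = e // 2'
def sqPow (result base e : Int) : Int :=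
  if 0 < e then
    sqPow (if PySem.Int.mod e 2 = 1 then result * base else result) (base * base)
      (PySem.Int.floordiv e 2)
  else result
termination_by e.toNat
decreasing_by
  rw [PySem.Int.floordiv_eq_ediv_of_pos (by omega)]
  omega

def minkowski_distance_p_alt (a : List Int) (b : List Int) (p : Int) : Int :=
  (a.zip b).foldl
    (fun total xy =>
      let base := xy.1 - xy.2
      let base := if base < 0 then -base else base
      total + sqPow 1 base p) 0

-- ===== PRECONDITION & SPEC =====
-- Pre_ excludes len(b) < len(a), where A raises IndexError on b[i].
def Pre_minkowski_distance_p (a : List Int) (b : List Int) (p : Int) : Prop :=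
  a.length ≤ b.length
instance (a : List Int) (b : List Int) (p : Int) : Decidable (Pre_minkowski_distance_p a b p) := by
  unfold Pre_minkowski_distance_p; infer_instance

def pvWitness_minkowski_distance_p : List Int × List Int × Int := ([1, 4], [3, -2], 3)

def Spec_minkowski_distance_p (a : List Int) (b : List Int) (p : Int) (out : Int) : Prop :=
  out = minkowski_distance_p_alt a b p
instance (a : List Int) (b : List Int) (p : Int) (out : Int) : Decidable (Spec_minkowski_distance_p a b p out) := by
  unfold Spec_minkowski_distance_p; infer_instance

-- ===== CLAIM (what is proved, stated in full; the proofs are below) =====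
def Claim_equal_minkowski_distance_p : Prop := ∀ (a : List Int) (b : List Int) (p : Int), Dom_minkowski_distance_p a b p → Pre_minkowski_distance_p a b p → Spec_minkowski_distance_p a b p (minkowski_distance_p a b p)

-- ===== LEMMAS AND PROOFS =====

theorem powLoopA_eq (diff power j p : Int) :
    powLoopA diff power j p = power * diff ^ (p - j).toNat := by
  fun_induction powLoopA with
  | case1 power j h ih =>
      rw [ih]
      have h1 : (p - j).toNat = (p - (j + 1)).toNat + 1 := by omega
      rw [h1, pow_succ]
      ring
  | case2 power j h =>
      have h1 : (p - j).toNat = 0 := by omega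
      rw [h1, pow_zero, mul_one]

theorem sqPow_eq_aux (n : Nat) : ∀ (result base e : Int), e.toNat ≤ n →
    sqPow result base e = result * base ^ e.toNat := by
  induction n with
  | zero =>
      intro result base e hle
      rw [sqPow, if_neg (by omega)]
      have h1 : e.toNat = 0 := by omega
      rw [h1, pow_zero, mul_one]
  | succ n ih =>
      intro result base e hle
      rw [sqPow]
      by_cases h : 0 < e
      · rw [if_pos h]
        rw [PySem.Int.floordiv_eq_ediv_of_pos (b := 2) (by omega),
            PySem.Int.mod_eq_emod_of_pos (b := 2) (by omega)]
        rw [ih _ _ _ (by omega)]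
        rw [mul_pow]
        by_cases hm : e % 2 = 1
        · have hk : e.toNat = (e / 2).toNat + (e / 2).toNat + 1 := by omega
          rw [if_pos hm, hk, pow_succ, pow_add]
          ring
        · have hk : e.toNat = (e / 2).toNat + (e / 2).toNat := by omega
          rw [if_neg hm, hk, pow_add]
      · rw [if_neg h]
        have h1 : e.toNat = 0 := by omega
        rw [h1, pow_zero, mul_one]

theorem sqPow_eq (result base e : Int) :
    sqPow result base e = result * base ^ e.toNat :=
  sqPow_eq_aux e.toNat result base e le_rfl

theorem abs_val_pow (x : Int) (p : Int) :
    powLoopA (abs_val x) 1 0 p = sqPow 1 (if x < 0 then -x else x) p := by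
  rw [powLoopA_eq, sqPow_eq, abs_val]
  norm_num

theorem outerA_eq (a b : List Int) (p : Int) (hab : a.length ≤ b.length)
    (total : Int) (i : Int) (h0 : 0 ≤ i) :
    outerA a b p total i =
      ((a.drop i.toNat).zip (b.drop i.toNat)).foldl
        (fun total xy =>
          let base := xy.1 - xy.2
          let base := if base < 0 then -base else base
          total + sqPow 1 base p) total := by
  fun_induction outerA with
  | case1 total i h ih =>
      have hia : i.toNat < a.length := by omega
      have hib : i.toNat < b.length := by omega
      rw [ih (by omega)]
      have hda : a.drop i.toNat = a[i.toNat] :: a.drop (i.toNat + 1) :=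
        List.drop_eq_getElem_cons hia
      have hdb : b.drop i.toNat = b[i.toNat] :: b.drop (i.toNat + 1) :=
        List.drop_eq_getElem_cons hib
      have hi1 : (i + 1).toNat = i.toNat + 1 := by omega
      rw [hda, hdb, hi1, List.zip_cons_cons, List.foldl_cons]
      congr 1
      rw [PySem.List.pyGetD_eq_getElem a 0 h0 (by omega),
          PySem.List.pyGetD_eq_getElem b 0 h0 (by omega)]
      exact congrArg (total + ·) (abs_val_pow _ p)
  | case2 total i h =>
      have h1 : a.length ≤ i.toNat := by omega
      rw [List.drop_eq_nil_of_le h1]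
      simp

-- ===== VERDICT (by name: the statement is the Claim_ definition above) =====
theorem minkowski_distance_p_spec : Claim_equal_minkowski_distance_p := by
  intro a b p _ hpre
  unfold Spec_minkowski_distance_p minkowski_distance_p minkowski_distance_p_alt
  rw [outerA_eq a b p hpre 0 0 (by omega)]
  simp
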